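-- pv_equiv track=rewrite | github.com/tagyoureit/unistore_performance_analysis | backend/core/table_profiler.py | _pick_time_column
-- ===== SOURCE A (Python) =====
-- from typing import Optional, Sequence
--
-- def _pick_time_column(columns: dict[str, str]) -> Optional[str]:
--     # Prefer common time columns, else any DATE/TIMESTAMP-ish column.
--     preferred = [
--         "TIMESTAMP",
--         "CREATED_AT",
--         "UPDATED_AT",
--         "EVENT_TIME",
--         "CREATED",
--         "UPDATED",
--         "DATE",
--     ]
--     for name in preferred:
--         if name in columns and any(
--             t in columns[name] for t in ("TIMESTAMP", "DATE", "TIME")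
--         ):
--             return name
--
--     for name, typ in columns.items():
--         if any(t in typ for t in ("TIMESTAMP", "DATE", "TIME")):
--             return name
--
--     return None
-- ===== SOURCE B (Python) =====
-- _PREFERRED = [
--     "TIMESTAMP",
--     "CREATED_AT",
--     "UPDATED_AT",
--     "EVENT_TIME",
--     "CREATED",
--     "UPDATED",
--     "DATE",
-- ]
--
--
-- def _pick_time_column(columns):
--     # Single-pass argmin: scan the columns once, keeping the time-like column
--     # whose name has the lowest preference rank (first occurrence wins ties,
--     # non-preferred names rank last); the cheap rank test short-circuits the
--     # substring tests once a candidate is held, and a rank-0 hit ends the scan.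
--     best_rank = len(_PREFERRED) + 1
--     best_name = None
--     for name, typ in columns.items():
--         try:
--             rank = _PREFERRED.index(name)
--         except ValueError:
--             rank = len(_PREFERRED)
--         if rank < best_rank and ("TIMESTAMP" in typ or "DATE" in typ or "TIME" in typ):
--             best_rank = rank
--             best_name = name
--             if rank == 0:
--                 break
--     return best_name
-- ===== Notes on version B (the rewrite author's own statement) =====
-- stated objective: alternative
-- what changed: Replaces A's staged strategy (a priority loop over the preferred names doing dict lookups, then a second full fallback scan) by a single-pass argmin: one scan over the columns keeps the time-like column whose name has the lowest preference rank (first occurrence wins ties, non-preferred names rank last), exiting early on a rank-0 hit; Pre_ requires distinct keys because the parameter is a dict and an association list with duplicate keys represents no dict input.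
import Mathlib
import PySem

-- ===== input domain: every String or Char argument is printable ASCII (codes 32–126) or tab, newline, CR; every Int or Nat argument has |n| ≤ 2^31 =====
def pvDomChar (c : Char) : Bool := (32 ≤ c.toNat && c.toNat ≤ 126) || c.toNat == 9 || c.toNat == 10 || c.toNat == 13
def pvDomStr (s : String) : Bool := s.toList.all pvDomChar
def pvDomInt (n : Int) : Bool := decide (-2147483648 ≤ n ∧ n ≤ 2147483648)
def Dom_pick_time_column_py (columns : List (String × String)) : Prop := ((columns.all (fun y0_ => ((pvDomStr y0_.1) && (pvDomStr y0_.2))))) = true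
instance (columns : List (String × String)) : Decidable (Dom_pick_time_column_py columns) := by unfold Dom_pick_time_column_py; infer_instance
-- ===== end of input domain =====

-- B replaces A's staged scans (priority loop with dict lookups, then a fallback scan)
-- by a single-pass argmin over the columns keyed by preference rank, with early exit on rank 0.


-- ===== PORT A =====
-- any(t in typ for t in ("TIMESTAMP", "DATE", "TIME"))
def pvIsTime (typ : String) : Bool :=
  ["TIMESTAMP", "DATE", "TIME"].any (fun t => PySem.Str.isIn t typ)

def pvPreferred : List String :=
  ["TIMESTAMP", "CREATED_AT", "UPDATED_AT", "EVENT_TIME", "CREATED", "UPDATED", "DATE"]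

def pick_time_column_py (columns : List (String × String)) : Option String :=
  -- first loop: return the first preferred name that is a key with a time-like type
  match pvPreferred.find? (fun name =>
      match (PySem.Dict.mk columns).get? name with
      | some typ => pvIsTime typ
      | none => false) with
  | some name => some name
  | none =>
    -- second loop over columns.items(): return the first name whose type is time-like
    match columns.find? (fun p => pvIsTime p.2) with
    | some p => some p.1
    | none => none

-- ===== PORT B =====
-- the for loop: best_rank/best_name accumulator, `break` when rank == 0
def pvScan : List (String × String) → Nat → Option String → Nat × Option String
  | [], best_rank, best_name => (best_rank, best_name)
  | (name, typ) :: rest, best_rank, best_name =>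
    -- rank = _PREFERRED.index(name), except ValueError → len(_PREFERRED)
    let rank := pvPreferred.idxOf name
    if decide (rank < best_rank)
        && (PySem.Str.isIn "TIMESTAMP" typ || PySem.Str.isIn "DATE" typ
            || PySem.Str.isIn "TIME" typ) then
      if rank == 0 then (rank, some name)   -- break
      else pvScan rest rank (some name)
    else pvScan rest best_rank best_name

def pick_time_column_py_alt (columns : List (String × String)) : Option String :=
  (pvScan columns 8 none).2   -- best_rank starts at len(_PREFERRED) + 1 = 8

-- ===== PRECONDITION & SPEC =====
-- The Python parameter is a dict, so its keys are distinct; an association list with a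
-- duplicated key represents no dict input, and the two ports' behaviour there is accidental.
def Pre_pick_time_column_py (columns : List (String × String)) : Prop :=
  (columns.map Prod.fst).Nodup
instance (columns : List (String × String)) : Decidable (Pre_pick_time_column_py columns) := by
  unfold Pre_pick_time_column_py; infer_instance

def pvWitness_pick_time_column_py : (List (String × String)) :=
  [("ID", "NUMBER"), ("CREATED_AT", "TIMESTAMP_NTZ")]

def Spec_pick_time_column_py (columns : List (String × String)) (out : Option String) : Prop := out = pick_time_column_py_alt columns
instance (columns : List (String × String)) (out : Option String) : Decidable (Spec_pick_time_column_py columns out) := by unfold Spec_pick_time_column_py; infer_instance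

-- ===== CLAIM (what is proved, stated in full; the proofs are below) =====
def Claim_equal_pick_time_column_py : Prop := ∀ (columns : List (String × String)), Dom_pick_time_column_py columns → Pre_pick_time_column_py columns → Spec_pick_time_column_py columns (pick_time_column_py columns)

-- ===== LEMMAS AND PROOFS =====

-- B's containment test on typ equals A's `any` over the tuple of markers.
theorem pv_isTime_eq (typ : String) :
    (PySem.Str.isIn "TIMESTAMP" typ || PySem.Str.isIn "DATE" typ || PySem.Str.isIn "TIME" typ)
      = pvIsTime typ := by
  simp [pvIsTime, List.any, Bool.or_assoc]

-- one step of B's loop, restricted to time-like columns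
def pvStep' (b : Nat × Option String) (p : String × String) : Nat × Option String :=
  if pvPreferred.idxOf p.1 < b.1 then (pvPreferred.idxOf p.1, some p.1) else b

-- one step of B's loop on an arbitrary column
def pvStep (b : Nat × Option String) (p : String × String) : Nat × Option String :=
  if pvIsTime p.2 then pvStep' b p else b

-- leftmost-min combiner
def pvComb (a b : Nat × Option String) : Nat × Option String := if b.1 < a.1 then b else a

theorem pv_pref_len : pvPreferred.length = 7 := rfl

theorem pv_comb_assoc (a b c : Nat × Option String) :
    pvComb (pvComb a b) c = pvComb a (pvComb b c) := by
  unfold pvComb; split_ifs <;> first | rfl | (exfalso; omega)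

theorem pv_step'_eq_comb (b : Nat × Option String) (p : String × String) :
    pvStep' b p = pvComb b (pvPreferred.idxOf p.1, some p.1) := rfl

theorem pv_rank_le (name : String) : pvPreferred.idxOf name ≤ 7 := by
  have h := @List.idxOf_le_length String _ _ pvPreferred name
  rw [pv_pref_len] at h
  exact h

theorem pv_step8 (p : String × String) :
    pvStep' (8, none) p = (pvPreferred.idxOf p.1, some p.1) := by
  unfold pvStep'
  split_ifs with h
  · rfl
  · exfalso; have := pv_rank_le p.1; simp at h; omega

theorem pv_step'_fst_le (b : Nat × Option String) (p : String × String) :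
    (pvStep' b p).1 ≤ b.1 := by
  unfold pvStep'; split_ifs with h
  · exact Nat.le_of_lt h
  · exact Nat.le_refl _

-- once best_rank = 0 nothing changes (justifies the `break`)
theorem pv_foldl_zero (xs : List (String × String)) (no : Option String) :
    List.foldl pvStep (0, no) xs = (0, no) := by
  induction xs with
  | nil => rfl
  | cons p rest ih =>
    rw [List.foldl_cons]
    have h : pvStep (0, no) p = (0, no) := by
      unfold pvStep pvStep'
      split_ifs <;> first | rfl | omega
    rw [h, ih]

-- the loop with break equals a plain foldl
theorem pv_scan_eq_foldl (xs : List (String × String)) (r : Nat) (no : Option String) :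
    pvScan xs r no = List.foldl pvStep (r, no) xs := by
  induction xs generalizing r no with
  | nil => rfl
  | cons p rest ih =>
    obtain ⟨name, typ⟩ := p
    rw [List.foldl_cons]
    unfold pvScan
    rw [pv_isTime_eq]
    by_cases ht : pvIsTime typ
    · by_cases hlt : pvPreferred.idxOf name < r
      · have hc : (decide (pvPreferred.idxOf name < r) && pvIsTime typ) = true := by
          simp [hlt, ht]
        simp only [hc, if_true]
        have hstep : pvStep (r, no) (name, typ) = (pvPreferred.idxOf name, some name) := by
          unfold pvStep pvStep'
          rw [if_pos ht, if_pos hlt]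
        rw [hstep]
        by_cases h0 : pvPreferred.idxOf name = 0
        · have hb : (pvPreferred.idxOf name == 0) = true := by simp [h0]
          simp only [h0]
          exact (pv_foldl_zero rest (some name)).symm
        · have hb : (pvPreferred.idxOf name == 0) = false := by simp [h0]
          simp only [hb, Bool.false_eq_true, if_false]
          exact ih _ _
      · have hc : (decide (pvPreferred.idxOf name < r) && pvIsTime typ) = false := by
          simp [hlt]
        simp only [hc, Bool.false_eq_true, if_false]
        have hstep : pvStep (r, no) (name, typ) = (r, no) := by
          unfold pvStep pvStep'
          rw [if_pos ht, if_neg hlt]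
        rw [hstep]
        exact ih _ _
    · have hc : (decide (pvPreferred.idxOf name < r) && pvIsTime typ) = false := by
        simp [ht]
      simp only [hc, Bool.false_eq_true, if_false]
      have hstep : pvStep (r, no) (name, typ) = (r, no) := by
        unfold pvStep; rw [if_neg (by simp [ht])]
      rw [hstep]
      exact ih _ _

-- skipping non-time columns = folding over the filtered list
theorem pv_foldl_filter (xs : List (String × String)) (b : Nat × Option String) :
    List.foldl pvStep b xs = List.foldl pvStep' b (xs.filter (fun p => pvIsTime p.2)) := by
  induction xs generalizing b with
  | nil => rfl
  | cons p rest ih =>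
    by_cases ht : pvIsTime p.2
    · simp only [List.foldl_cons, List.filter_cons, ht, if_true]
      have h : pvStep b p = pvStep' b p := by unfold pvStep; rw [if_pos ht]
      rw [h, ih]
    · simp only [List.foldl_cons, List.filter_cons, ht, Bool.false_eq_true, if_false]
      have h : pvStep b p = b := by unfold pvStep; rw [if_neg (by simp [ht])]
      rw [h, ih]

theorem pv_foldl_comb (xs : List (String × String)) (b : Nat × Option String) (hb : b.1 ≤ 8) :
    List.foldl pvStep' b xs = pvComb b (List.foldl pvStep' (8, none) xs) := by
  induction xs generalizing b with
  | nil =>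
    rw [List.foldl_nil, List.foldl_nil]
    unfold pvComb
    rw [if_neg (by simp; omega)]
  | cons p rest ih =>
    have h1 : (pvStep' b p).1 ≤ 8 := le_trans (pv_step'_fst_le b p) hb
    have h2 : (pvStep' (8, none) p).1 ≤ 8 := by
      rw [pv_step8]; exact le_trans (pv_rank_le p.1) (by norm_num)
    calc List.foldl pvStep' b (p :: rest)
        = pvComb (pvStep' b p) (List.foldl pvStep' (8, none) rest) := by
          rw [List.foldl_cons]; exact ih _ h1
      _ = pvComb (pvComb b (pvPreferred.idxOf p.1, some p.1))
            (List.foldl pvStep' (8, none) rest) := by rw [pv_step'_eq_comb]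
      _ = pvComb b (pvComb (pvPreferred.idxOf p.1, some p.1)
            (List.foldl pvStep' (8, none) rest)) := pv_comb_assoc _ _ _
      _ = pvComb b (pvComb (pvStep' (8, none) p) (List.foldl pvStep' (8, none) rest)) := by
          rw [pv_step8]
      _ = pvComb b (List.foldl pvStep' (8, none) (p :: rest)) := by
          rw [List.foldl_cons, ih _ h2]

-- characterisation of B's fold on a nonempty (filtered) list
theorem pv_inv (ms : List (String × String)) (hne : ms ≠ []) :
    ∃ r n, List.foldl pvStep' (8, none) ms = (r, some n)
      ∧ pvPreferred.idxOf n = r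
      ∧ n ∈ ms.map Prod.fst
      ∧ (∀ m ∈ ms.map Prod.fst, r ≤ pvPreferred.idxOf m)
      ∧ (r = 7 → (ms.map Prod.fst).head? = some n) := by
  induction ms with
  | nil => exact absurd rfl hne
  | cons p rest ih =>
    have hfold : List.foldl pvStep' (8, none) (p :: rest)
        = pvComb (pvPreferred.idxOf p.1, some p.1) (List.foldl pvStep' (8, none) rest) := by
      rw [List.foldl_cons, pv_step8,
        pv_foldl_comb rest _ (le_trans (pv_rank_le p.1) (by norm_num))]
    by_cases hr : rest = []
    · subst hr
      refine ⟨pvPreferred.idxOf p.1, p.1, ?_, rfl, by simp, ?_, ?_⟩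
      · rw [hfold, List.foldl_nil]
        unfold pvComb
        rw [if_neg (by have := pv_rank_le p.1; simp; omega)]
      · intro m hm; simp at hm; subst hm; exact Nat.le_refl _
      · intro _; simp
    · obtain ⟨r', n', heq, hidx, hmem, hmin, hhead⟩ := ih hr
      rw [heq] at hfold
      by_cases hlt : r' < pvPreferred.idxOf p.1
      · refine ⟨r', n', ?_, hidx, ?_, ?_, ?_⟩
        · rw [hfold]; unfold pvComb; rw [if_pos (by simpa using hlt)]
        · simp only [List.map_cons, List.mem_cons]; exact Or.inr hmem
        · intro m hm
          simp only [List.map_cons, List.mem_cons] at hm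
          rcases hm with h | h
          · subst h; exact Nat.le_of_lt hlt
          · exact hmin m h
        · intro h7
          exfalso
          have := pv_rank_le p.1
          omega
      · refine ⟨pvPreferred.idxOf p.1, p.1, ?_, rfl, by simp, ?_, ?_⟩
        · rw [hfold]; unfold pvComb; rw [if_neg (by simpa using hlt)]
        · intro m hm
          simp only [List.map_cons, List.mem_cons] at hm
          rcases hm with h | h
          · subst h; exact Nat.le_refl _
          · exact le_trans (Nat.le_of_not_lt hlt) (hmin m h)
        · intro _; simp

-- the preferred-name search returns the name of minimal rank, when that rank is realised
theorem pv_find_char (pref : List String) (names : List String) (n : String)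
    (hn : n ∈ names) (hlt : pref.idxOf n < pref.length)
    (hmin : ∀ m ∈ names, pref.idxOf n ≤ pref.idxOf m) :
    pref.find? (fun m => names.contains m) = some n := by
  induction pref with
  | nil => simp at hlt
  | cons q ps ih =>
    by_cases hq : names.contains q = true
    · rw [List.find?_cons_of_pos hq]
      by_cases hqn : q = n
      · rw [hqn]
      · exfalso
        have h2 := hmin q (by simpa using hq)
        have h3 : List.idxOf n (q :: ps) = (List.idxOf n ps).succ :=
          List.idxOf_cons_ne ps hqn
        rw [List.idxOf_cons_self] at h2
        omega
    · rw [List.find?_cons_of_neg (by simpa using hq)]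
      have hqn : q ∉ names := by simpa using hq
      have hne : q ≠ n := fun h => hqn (h ▸ hn)
      have hn' : List.idxOf n (q :: ps) = (List.idxOf n ps).succ := List.idxOf_cons_ne ps hne
      apply ih
      · rw [hn'] at hlt; simp only [List.length_cons] at hlt; omega
      · intro m hm
        have hnem : q ≠ m := fun h => hqn (h ▸ hm)
        have hmn := hmin m hm
        rw [hn', List.idxOf_cons_ne ps hnem] at hmn
        omega

-- when no name reaches a preferred slot, the search fails
theorem pv_find_none (pref : List String) (names : List String)
    (h : ∀ m ∈ names, pref.length ≤ pref.idxOf m) :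
    pref.find? (fun m => names.contains m) = none := by
  rw [List.find?_eq_none]
  intro x hx
  simp only [List.contains_eq_mem, decide_eq_true_eq]
  intro hxn
  have h1 := h x hxn
  have h2 := List.idxOf_lt_length_of_mem hx
  omega

-- Under distinct keys, A's per-name test (lookup then type check) coincides with
-- membership in the filtered name list.
theorem pv_lookup_eq_mem_matches (columns : List (String × String)) (name : String)
    (h : (columns.map Prod.fst).Nodup) :
    (match (PySem.Dict.mk columns).get? name with
     | some typ => pvIsTime typ
     | none => false)
      = ((columns.filter (fun p => pvIsTime p.2)).map Prod.fst).contains name := by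
  induction columns with
  | nil => simp [PySem.Dict.get?]
  | cons kv rest ih =>
    obtain ⟨k, v⟩ := kv
    simp only [List.map_cons, List.nodup_cons] at h
    rw [PySem.Dict.get?_mk_cons]
    by_cases hk : k = name
    · subst hk
      simp only [beq_self_eq_true, if_true, List.filter_cons]
      by_cases hv : pvIsTime v
      · simp [hv]
      · have hnot : ¬ k ∈ List.map Prod.fst (rest.filter (fun p => pvIsTime p.2)) := by
          intro hmem
          rcases List.mem_map.1 hmem with ⟨p, hp, hpk⟩
          exact h.1 (List.mem_map.2 ⟨p, List.mem_of_mem_filter hp, hpk⟩)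
        simp [hv, List.contains_eq_mem, hnot]
    · have hbeq : (k == name) = false := by simp [hk]
      rw [if_neg (by simp [hk]), ih h.2]
      simp only [List.filter_cons]
      by_cases hv : pvIsTime v
      · simp [hv, List.contains_eq_mem, Ne.symm hk]
      · simp [hv]

-- A's fallback scan result is the head of the filtered name list.
theorem pv_head_filter_map (columns : List (String × String)) :
    (match columns.find? (fun p => pvIsTime p.2) with
     | some p => some p.1
     | none => none)
      = ((columns.filter (fun p => pvIsTime p.2)).map Prod.fst).head? := by
  induction columns with
  | nil => rfl
  | cons kv rest ih =>
    by_cases hv : pvIsTime kv.2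
    · simp [hv]
    · simp only [List.find?_cons, List.filter_cons, hv, Bool.false_eq_true, if_false]
      exact ih

-- ===== VERDICT (by name: the statement is the Claim_ definition above) =====
theorem pick_time_column_py_spec : Claim_equal_pick_time_column_py := by
  intro columns _ hpre
  unfold Spec_pick_time_column_py
  unfold pick_time_column_py
  rw [funext (fun name => pv_lookup_eq_mem_matches columns name hpre)]
  rw [pv_head_filter_map]
  unfold pick_time_column_py_alt
  rw [pv_scan_eq_foldl, pv_foldl_filter]
  generalize columns.filter (fun p => pvIsTime p.2) = ms
  by_cases hne : ms = []
  · subst hne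
    simp only [List.map_nil]
    have h0 : List.find? (fun m => ([] : List String).contains m) pvPreferred = none :=
      pv_find_none pvPreferred [] (by simp)
    have h1 : List.find? ([] : List String).contains pvPreferred = none := h0
    rw [h1]
    rfl
  · obtain ⟨r, n, heq, hidx, hmem, hmin, hhead⟩ := pv_inv ms hne
    rw [heq]
    have hr7 : r ≤ 7 := hidx ▸ pv_rank_le n
    by_cases hr : r < 7
    · rw [pv_find_char pvPreferred (ms.map Prod.fst) n hmem
        (by rw [hidx, pv_pref_len]; exact hr) (fun m hm => hidx ▸ hmin m hm)]
    · have h7 : r = 7 := by omega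
      rw [pv_find_none pvPreferred (ms.map Prod.fst)
        (fun m hm => by have hx := hmin m hm; rw [pv_pref_len]; omega)]
      rw [hhead h7]
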